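-- pv_equiv track=rewrite | github.com/pypi-data/pypi-mirror-385 | packages/xmptools/xmptools-0.6.7-py3-none-any.whl/xmptools/xmptools.py | adjustTriple
-- ===== SOURCE A (Python) =====
-- def adjustTriple(triple, node_map, check_predicates=False):
--     s, p, o = triple
--     for node in node_map:
--         if s == node:
--             s = node_map[node]
--         if check_predicates and p == node:
--             p = node_map[node]
--         if o == node:
--             o = node_map[node]
--     return s, p, o
-- ===== SOURCE B (Python) =====
-- def adjustTriple(triple, node_map, check_predicates=False):
--     # Precompose the chain of substitutions into one table by a reverse pass,
--     # then answer each component with a single lookup.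
--     final = {}
--     for node in reversed(list(node_map)):
--         v = node_map[node]
--         final[node] = final.get(v, v)
--     s, p, o = triple
--     return (final.get(s, s),
--             final.get(p, p) if check_predicates else p,
--             final.get(o, o))
-- ===== Notes on version B (the rewrite author's own statement) =====
-- stated objective: alternative
-- what changed: Instead of scanning the mapping once per call and rewriting the triple components in lockstep, B precomposes the whole substitution chain into a single lookup table by one reverse pass over node_map (final[k] = final.get(v, v)) and then resolves each component with a single dict lookup.
import Mathlib
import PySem

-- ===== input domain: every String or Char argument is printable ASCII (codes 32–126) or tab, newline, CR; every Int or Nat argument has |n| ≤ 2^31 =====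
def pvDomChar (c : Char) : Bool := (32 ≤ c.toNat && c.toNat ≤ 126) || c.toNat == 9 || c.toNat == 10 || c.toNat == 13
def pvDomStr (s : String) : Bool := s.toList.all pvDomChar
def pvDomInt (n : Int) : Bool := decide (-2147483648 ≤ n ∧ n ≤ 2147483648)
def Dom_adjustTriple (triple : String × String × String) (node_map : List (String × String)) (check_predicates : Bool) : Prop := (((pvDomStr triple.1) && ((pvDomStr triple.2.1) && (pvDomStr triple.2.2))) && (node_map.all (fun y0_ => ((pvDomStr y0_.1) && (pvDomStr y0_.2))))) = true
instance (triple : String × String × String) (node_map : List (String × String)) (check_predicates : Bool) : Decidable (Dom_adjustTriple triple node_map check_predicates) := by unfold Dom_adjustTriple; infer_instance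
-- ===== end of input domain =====

-- B (objective: alternative): precomposes the substitution chain into one lookup table by a reverse pass over node_map, then resolves each triple component with a single dict lookup, instead of A's forward lockstep rewriting loop; same cost.


-- ===== PORT A =====
-- Port of A: one fold over node_map carrying the state (s, p, o), updating the three
-- components in lockstep exactly as the Python loop does.
def adjustTriple (triple : String × String × String) (node_map : List (String × String)) (check_predicates : Bool) : String × String × String :=
  node_map.foldl
    (fun st node =>
      let s := if st.1 == node.1 then node.2 else st.1
      let p := if check_predicates && (st.2.1 == node.1) then node.2 else st.2.1
      let o := if st.2.2 == node.1 then node.2 else st.2.2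
      (s, p, o))
    (triple.1, triple.2.1, triple.2.2)

-- ===== PORT B =====
-- B: build the composed substitution table `final` by folding over node_map reversed
-- (final[node] = final.get(v, v)), then answer each component with one lookup.
def pvBuildFinal (node_map : List (String × String)) : PySem.Dict String String :=
  node_map.reverse.foldl
    (fun final node => final.insert node.1 (final.getD node.2 node.2))
    PySem.Dict.empty

def adjustTriple_alt (triple : String × String × String) (node_map : List (String × String)) (check_predicates : Bool) : String × String × String :=
  let final := pvBuildFinal node_map
  (final.getD triple.1 triple.1,
   if check_predicates then final.getD triple.2.1 triple.2.1 else triple.2.1,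
   final.getD triple.2.2 triple.2.2)

-- ===== PRECONDITION & SPEC =====
def Spec_adjustTriple (triple : String × String × String) (node_map : List (String × String)) (check_predicates : Bool) (out : String × String × String) : Prop := out = adjustTriple_alt triple node_map check_predicates
instance (triple : String × String × String) (node_map : List (String × String)) (check_predicates : Bool) (out : String × String × String) : Decidable (Spec_adjustTriple triple node_map check_predicates out) := by unfold Spec_adjustTriple; infer_instance

-- ===== CLAIM (what is proved, stated in full; the proofs are below) =====
def Claim_equal_adjustTriple : Prop := ∀ (triple : String × String × String) (node_map : List (String × String)) (check_predicates : Bool), Dom_adjustTriple triple node_map check_predicates → Spec_adjustTriple triple node_map check_predicates (adjustTriple triple node_map check_predicates)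

-- ===== LEMMAS AND PROOFS =====

-- The forward substitution chain a single component undergoes in A's loop.
def pvChain (node_map : List (String × String)) (x : String) : String :=
  node_map.foldl (fun x node => if x == node.1 then node.2 else x) x

-- A equals the componentwise chains.
theorem pv_A_chains (node_map : List (String × String)) (check_predicates : Bool) :
    ∀ (s p o : String),
      adjustTriple (s, p, o) node_map check_predicates =
        (pvChain node_map s,
         if check_predicates then pvChain node_map p else p,
         pvChain node_map o) := by
  induction node_map with
  | nil =>
      intro s p o
      cases check_predicates <;> simp [adjustTriple, pvChain]
  | cons hd tl ih =>
      intro s p o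
      have h := ih (if s == hd.1 then hd.2 else s)
        (if check_predicates && (p == hd.1) then hd.2 else p)
        (if o == hd.1 then hd.2 else o)
      simp only [adjustTriple, List.foldl_cons] at h ⊢
      rw [h]
      cases check_predicates <;> simp [pvChain]

-- The reverse-built table answers exactly the forward chain.
theorem pv_final_chain (node_map : List (String × String)) :
    ∀ x, (pvBuildFinal node_map).getD x x = pvChain node_map x := by
  induction node_map with
  | nil => intro x; simp [pvBuildFinal, pvChain, PySem.Dict.getD_empty]
  | cons hd tl ih =>
      intro x
      have hb : pvBuildFinal (hd :: tl) =
          (pvBuildFinal tl).insert hd.1 ((pvBuildFinal tl).getD hd.2 hd.2) := by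
        simp [pvBuildFinal, List.foldl_append]
      rw [hb, PySem.Dict.getD_insert]
      by_cases hx : x = hd.1
      · simp [hx, pvChain, ih]
      · simp [pvChain, hx, ih x]

-- ===== VERDICT (by name: the statement is the Claim_ definition above) =====
theorem adjustTriple_spec : Claim_equal_adjustTriple := by
  intro triple node_map check_predicates _
  unfold Spec_adjustTriple adjustTriple_alt
  obtain ⟨s, p, o⟩ := triple
  rw [pv_A_chains]
  simp [pv_final_chain]
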